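-- pv_equiv track=rewrite | github.com/JacobAMason/Project-Euler | 11.py | find_horizontal_max
-- ===== SOURCE A (Python) =====
-- from functools import reduce
--
-- def mul(iterable):
--     return reduce( (lambda x, y: x*y), iterable )
--
-- def find_horizontal_max(numberGrid, consecutiveNumbers):
--     highestProduct = 0
--     for y in range(len(numberGrid)):
--         numbersToMultiply = [numberGrid[y][i] for i in range(consecutiveNumbers)]
--         product = mul(numbersToMultiply)
--         highestProduct = max(highestProduct, product)
--         for x in range(consecutiveNumbers, len(numberGrid[0])):
--             try:
--                 product //= numbersToMultiply.pop(0)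
--             except ZeroDivisionError:
--                 product = mul(numbersToMultiply)
--             product *= numberGrid[y][x]
--             highestProduct = max(highestProduct, product)
--             numbersToMultiply.append(numberGrid[y][x])
--
--     return highestProduct
-- ===== SOURCE B (Python) =====
-- from functools import reduce
--
-- def find_horizontal_max(numberGrid, consecutiveNumbers):
--     highestProduct = 0
--     for row in numberGrid:
--         firstWindow = [row[i] for i in range(consecutiveNumbers)]
--         highestProduct = max(highestProduct, reduce(lambda a, b: a * b, firstWindow))
--         for x in range(consecutiveNumbers, len(numberGrid[0])):
--             window = [row[i] for i in range(x - consecutiveNumbers + 1, x + 1)]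
--             highestProduct = max(highestProduct, reduce(lambda a, b: a * b, window))
--     return highestProduct
-- ===== Notes on version B (the rewrite author's own statement) =====
-- stated objective: simpler
-- what changed: B drops A's sliding-window machinery (the pop/append window list, the floor-division slide and the ZeroDivisionError recompute handler) and instead recomputes each window's product directly from the slice row[x-k+1:x+1], keeping the same window set and the same values.
import Mathlib
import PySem

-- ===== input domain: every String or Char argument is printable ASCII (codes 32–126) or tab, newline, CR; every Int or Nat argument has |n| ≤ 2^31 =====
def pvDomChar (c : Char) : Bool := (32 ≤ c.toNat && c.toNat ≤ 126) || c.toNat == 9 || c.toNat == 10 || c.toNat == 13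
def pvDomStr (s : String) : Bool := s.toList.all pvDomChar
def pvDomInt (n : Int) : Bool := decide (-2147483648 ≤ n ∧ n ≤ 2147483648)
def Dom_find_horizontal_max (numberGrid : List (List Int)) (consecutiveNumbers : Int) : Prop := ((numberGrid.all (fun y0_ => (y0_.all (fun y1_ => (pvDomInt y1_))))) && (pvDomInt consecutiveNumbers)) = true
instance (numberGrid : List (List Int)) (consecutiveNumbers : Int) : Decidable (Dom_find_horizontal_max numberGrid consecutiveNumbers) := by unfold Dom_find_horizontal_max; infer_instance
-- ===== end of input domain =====

-- B replaces A's sliding-division window (pop/floordiv/try-except) with a plain recomputation of each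
-- window's product from a slice: simpler, same values on all inputs where A returns.

-- ===== PORT A =====
-- reduce(lambda x, y: x*y, iterable); Python raises TypeError on an empty iterable (excluded by Pre_)
def pvMulA : List Int → Int
  | [] => 0
  | h :: t => t.foldl (· * ·) h

-- the body of A's inner 'for x in range(...)' loop; state = (numbersToMultiply, product, highestProduct)
def pvStepA (row : List Int) (st : List Int × Int × Int) (x : Int) : List Int × Int × Int :=
  let nums := st.1
  let h := nums.headD 0            -- numbersToMultiply.pop(0); nonempty under Pre_
  let rest := nums.tail
  let product := if h = 0 then pvMulA rest else PySem.Int.floordiv st.2.1 h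
  let v := PySem.List.pyGetD row x 0   -- numberGrid[y][x]; in range under Pre_
  let product := product * v
  (rest ++ [v], product, max st.2.2 product)

def find_horizontal_max (numberGrid : List (List Int)) (consecutiveNumbers : Int) : Int :=
  numberGrid.foldl (fun highestProduct row =>
    let nums := (PySem.List.pyRange 0 consecutiveNumbers).map (fun i => PySem.List.pyGetD row i 0)
    let product := pvMulA nums
    let highestProduct := max highestProduct product
    ((PySem.List.pyRange consecutiveNumbers ((numberGrid.headD []).length : Int)).foldl
      (pvStepA row) (nums, product, highestProduct)).2.2) 0

-- ===== PORT B =====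
-- reduce(lambda a, b: a*b, window) in B (same contract as pvMulA: B raises on an empty window too)
def pvMulB : List Int → Int
  | [] => 0
  | h :: t => t.foldl (· * ·) h

-- the body of B's inner loop: recompute the product of the window ending at x from scratch
def pvStepB (row : List Int) (k : Int) (highest : Int) (x : Int) : Int :=
  max highest (pvMulB ((PySem.List.pyRange (x - k + 1) (x + 1)).map (fun i => PySem.List.pyGetD row i 0)))

def find_horizontal_max_alt (numberGrid : List (List Int)) (consecutiveNumbers : Int) : Int :=
  numberGrid.foldl (fun highestProduct row =>
    let firstWindow := (PySem.List.pyRange 0 consecutiveNumbers).map (fun i => PySem.List.pyGetD row i 0)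
    let highestProduct := max highestProduct (pvMulB firstWindow)
    (PySem.List.pyRange consecutiveNumbers ((numberGrid.headD []).length : Int)).foldl
      (pvStepB row consecutiveNumbers) highestProduct) 0

-- ===== PRECONDITION & SPEC =====
-- Pre_ excludes exactly the inputs on which A raises: a nonempty grid with consecutiveNumbers < 1
-- (TypeError: reduce of empty sequence), a row shorter than max(consecutiveNumbers, len(grid[0]))
-- (IndexError), and consecutiveNumbers = 1 with a 0 among the first len(grid[0])-1 entries of a row
-- (the ZeroDivisionError handler then reduces an empty list: TypeError).
def Pre_find_horizontal_max (numberGrid : List (List Int)) (consecutiveNumbers : Int) : Prop :=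
  (numberGrid = [] ∨ 1 ≤ consecutiveNumbers) ∧
  (∀ row ∈ numberGrid, consecutiveNumbers.toNat ≤ row.length ∧ (numberGrid.headD []).length ≤ row.length) ∧
  (consecutiveNumbers = 1 → ∀ row ∈ numberGrid, (0:Int) ∉ row.take ((numberGrid.headD []).length - 1))
instance (numberGrid : List (List Int)) (consecutiveNumbers : Int) : Decidable (Pre_find_horizontal_max numberGrid consecutiveNumbers) := by unfold Pre_find_horizontal_max; infer_instance

def pvWitness_find_horizontal_max : List (List Int) × Int := ([[1, -2, 3, 0], [2, 5, 0, 1]], 2)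

def Spec_find_horizontal_max (numberGrid : List (List Int)) (consecutiveNumbers : Int) (out : Int) : Prop := out = find_horizontal_max_alt numberGrid consecutiveNumbers
instance (numberGrid : List (List Int)) (consecutiveNumbers : Int) (out : Int) : Decidable (Spec_find_horizontal_max numberGrid consecutiveNumbers out) := by unfold Spec_find_horizontal_max; infer_instance

-- ===== CLAIM (what is proved, stated in full; the proofs are below) =====
def Claim_equal_find_horizontal_max : Prop := ∀ (numberGrid : List (List Int)) (consecutiveNumbers : Int), Dom_find_horizontal_max numberGrid consecutiveNumbers → Pre_find_horizontal_max numberGrid consecutiveNumbers → Spec_find_horizontal_max numberGrid consecutiveNumbers (find_horizontal_max numberGrid consecutiveNumbers)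


-- ===== LEMMAS AND PROOFS =====

theorem pvMulA_eq_prod (l : List Int) (h : l ≠ []) : pvMulA l = l.prod := by
  cases l with
  | nil => exact absurd rfl h
  | cons a t =>
    calc pvMulA (a :: t) = List.foldl (· * ·) (a * 1) t := by simp [pvMulA]
    _ = a * List.foldl (· * ·) 1 t := List.foldl_assoc
    _ = (a :: t).prod := by rw [← List.prod_eq_foldl, List.prod_cons]

theorem pvMulB_eq_prod (l : List Int) (h : l ≠ []) : pvMulB l = l.prod := by
  cases l with
  | nil => exact absurd rfl h
  | cons a t =>
    calc pvMulB (a :: t) = List.foldl (· * ·) (a * 1) t := by simp [pvMulB]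
    _ = a * List.foldl (· * ·) 1 t := List.foldl_assoc
    _ = (a :: t).prod := by rw [← List.prod_eq_foldl, List.prod_cons]

theorem pv_range_getD_off (row : List Int) (a b : Nat) (hab : a ≤ b) (h : b ≤ row.length) :
    (PySem.List.pyRange (a:Int) (b:Int)).map (fun i => PySem.List.pyGetD row i 0)
      = (row.drop a).take (b - a) := by
  rw [PySem.List.pyRange_one, List.map_map, show ((b:Int) - a).toNat = b - a by omega]
  apply List.ext_getElem
  · simp only [List.length_map, List.length_range, List.length_take, List.length_drop]; omega
  · intro i h1 h2
    simp only [List.getElem_map, List.getElem_range, Function.comp_apply, List.getElem_take,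
      List.getElem_drop]
    rw [show (a:Int) + (i:Int) = ((a + i : Nat) : Int) by push_cast; ring,
      PySem.List.pyGetD_natCast, List.getD_eq_getElem row 0 (by simp only [List.length_map, List.length_range] at h1; omega)]

theorem pv_range_getD (row : List Int) (K : Nat) (h : K ≤ row.length) :
    (List.range K).map (fun i => row.getD i 0) = row.take K := by
  apply List.ext_getElem
  · simp [h]
  · intro i h1 h2
    simp only [List.getElem_map, List.getElem_range, List.getElem_take]
    rw [List.getD_eq_getElem row 0 (by simp at h1; omega)]

-- one step of A's sliding window equals one step of B's recomputation, and the
-- window invariant (nums = row[j-K : j], product = its product) is preserved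
theorem pv_inner (row : List Int) (K n0 : Nat) (hK : 1 ≤ K) (hlen : n0 ≤ row.length)
    (hz : K = 1 → (0:Int) ∉ row.take (n0 - 1)) :
    ∀ (m j : Nat), n0 - j = m → K ≤ j → j ≤ n0 → ∀ (highest : Int),
      ((PySem.List.pyRange (j:Int) (n0:Int)).foldl (pvStepA row)
        ((row.drop (j - K)).take K, ((row.drop (j - K)).take K).prod, highest)).2.2
      = (PySem.List.pyRange (j:Int) (n0:Int)).foldl (pvStepB row (K:Int)) highest := by
  intro m
  induction m with
  | zero =>
    intro j hm hKj hjn highest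
    rw [PySem.List.pyRange_one_eq_nil (by exact_mod_cast (by omega : n0 ≤ j))]
    simp
  | succ m ih =>
    intro j hm hKj hjn highest
    have hjlt : j < n0 := by omega
    have hjr : j < row.length := by omega
    have hdK : j - K < row.length := by omega
    obtain ⟨K', rfl⟩ : ∃ K', K = K' + 1 := ⟨K - 1, by omega⟩
    have hd1 : j - (K' + 1) + 1 = j - K' := by omega
    have hwin : (row.drop (j - (K' + 1))).take (K' + 1)
        = row[j - (K' + 1)]'hdK :: (row.drop (j - K')).take K' := by
      rw [List.drop_eq_getElem_cons hdK, List.take_succ_cons, hd1]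
    have hrestlen : ((row.drop (j - K')).take K').length = K' := by
      simp only [List.length_take, List.length_drop]; omega
    -- the popped/divided product equals the product of the remaining K' elements
    have hprod : (if row[j - (K' + 1)]'hdK = 0 then pvMulA ((row.drop (j - K')).take K')
          else PySem.Int.floordiv (((row.drop (j - (K' + 1))).take (K' + 1)).prod) (row[j - (K' + 1)]'hdK))
        = ((row.drop (j - K')).take K').prod := by
      by_cases h0 : row[j - (K' + 1)]'hdK = 0
      · have hK'pos : 1 ≤ K' := by
          by_contra hc
          have hK0 : K' = 0 := by omega
          subst hK0
          have hjm : j - 1 < (row.take (n0 - 1)).length := by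
            simp only [List.length_take]; omega
          have hmem : (0:Int) ∈ row.take (n0 - 1) := by
            have := List.getElem_mem hjm
            rwa [List.getElem_take, show row[j - 1]'(by omega) = 0 from h0] at this
          exact hz rfl hmem
        rw [if_pos h0, pvMulA_eq_prod]
        exact List.ne_nil_of_length_pos (by rw [hrestlen]; omega)
      · rw [if_neg h0, hwin, List.prod_cons]
        exact Int.mul_fdiv_cancel_left _ h0
    have hget : PySem.List.pyGetD row (j:Int) 0 = row[j]'hjr := by
      rw [PySem.List.pyGetD_natCast, List.getD_eq_getElem row 0 hjr]
    have happ : (row.drop (j - K')).take K' ++ [row[j]'hjr] = (row.drop (j + 1 - (K' + 1))).take (K' + 1) := by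
      have hKd : K' < (row.drop (j - K')).length := by simp only [List.length_drop]; omega
      have hgd : (row.drop (j - K'))[K']'hKd = row[j]'hjr := by
        rw [List.getElem_drop]; congr 1; omega
      rw [show j + 1 - (K' + 1) = j - K' by omega, ← List.take_concat_get hKd,
        List.concat_eq_append, hgd]
    rw [PySem.List.pyRange_one_cons (by exact_mod_cast hjlt)]
    simp only [List.foldl_cons]
    have hstepA : pvStepA row ((row.drop (j - (K' + 1))).take (K' + 1),
          ((row.drop (j - (K' + 1))).take (K' + 1)).prod, highest) (j:Int)
        = ((row.drop (j + 1 - (K' + 1))).take (K' + 1),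
           ((row.drop (j + 1 - (K' + 1))).take (K' + 1)).prod,
           max highest (((row.drop (j + 1 - (K' + 1))).take (K' + 1)).prod)) := by
      have hprodnew : ((row.drop (j + 1 - (K' + 1))).take (K' + 1)).prod
          = ((row.drop (j - K')).take K').prod * row[j]'hjr := by
        rw [← happ, List.prod_append, List.prod_singleton]
      simp only [pvStepA, hwin, List.headD_cons, List.tail_cons, hget]
      rw [show (row[j - (K' + 1)]'hdK :: (row.drop (j - K')).take K').prod
          = ((row.drop (j - (K' + 1))).take (K' + 1)).prod by rw [hwin]]
      rw [hprod, hprodnew, happ]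
    have hstepB : pvStepB row ((K' + 1 : Nat) : Int) highest (j:Int)
        = max highest (((row.drop (j + 1 - (K' + 1))).take (K' + 1)).prod) := by
      simp only [pvStepB]
      rw [show (j:Int) - ((K' + 1 : Nat) : Int) + 1 = ((j - K' : Nat) : Int) by omega,
        show (j:Int) + 1 = ((j + 1 : Nat) : Int) by omega,
        pv_range_getD_off row (j - K') (j + 1) (by omega) (by omega),
        show j + 1 - (j - K') = K' + 1 by omega,
        show j + 1 - (K' + 1) = j - K' by omega,
        pvMulB_eq_prod _ (List.ne_nil_of_length_pos (by simp only [List.length_take, List.length_drop]; omega))]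
    rw [hstepA, hstepB]
    rw [show (j:Int) + 1 = ((j + 1 : Nat) : Int) by push_cast; ring]
    exact ih (j + 1) (by omega) (by omega) (by omega) _

-- the per-row loop bodies of the two ports agree, folded over any list of rows
theorem pv_fold (K : Nat) (hK : 1 ≤ K) (n0 : Nat) :
    ∀ (l : List (List Int)) (acc : Int),
    (∀ row ∈ l, K ≤ row.length ∧ n0 ≤ row.length ∧ (K = 1 → (0:Int) ∉ row.take (n0 - 1))) →
    l.foldl (fun highestProduct row =>
      let nums := (PySem.List.pyRange 0 (K:Int)).map (fun i => PySem.List.pyGetD row i 0)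
      let product := pvMulA nums
      let highestProduct := max highestProduct product
      ((PySem.List.pyRange (K:Int) (n0:Int)).foldl (pvStepA row) (nums, product, highestProduct)).2.2) acc
    = l.foldl (fun highestProduct row =>
      let firstWindow := (PySem.List.pyRange 0 (K:Int)).map (fun i => PySem.List.pyGetD row i 0)
      let highestProduct := max highestProduct (pvMulB firstWindow)
      (PySem.List.pyRange (K:Int) (n0:Int)).foldl (pvStepB row (K:Int)) highestProduct) acc := by
  intro l
  induction l with
  | nil => intro acc _; rfl
  | cons row t ih =>
    intro acc hrows
    obtain ⟨h1, h2, h3⟩ := hrows row (by simp)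
    have hrest : ∀ r ∈ t, K ≤ r.length ∧ n0 ≤ r.length ∧ (K = 1 → (0:Int) ∉ r.take (n0 - 1)) :=
      fun r hr => hrows r (List.mem_cons_of_mem _ hr)
    simp only [List.foldl_cons]
    have hnums : (PySem.List.pyRange 0 (K:Int)).map (fun i => PySem.List.pyGetD row i 0) = row.take K := by
      rw [PySem.List.pyRange_zero_nat, List.map_map, ← pv_range_getD row K h1]
      apply List.map_congr_left
      intro i _
      simp [PySem.List.pyGetD_natCast]
    have htkne : row.take K ≠ [] :=
      List.ne_nil_of_length_pos (by simp only [List.length_take]; omega)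
    have hmulA : pvMulA (row.take K) = (row.take K).prod := pvMulA_eq_prod _ htkne
    have hmulB : pvMulB (row.take K) = (row.take K).prod := pvMulB_eq_prod _ htkne
    have hhead : ((PySem.List.pyRange (K:Int) (n0:Int)).foldl (pvStepA row)
          (row.take K, (row.take K).prod, max acc ((row.take K).prod))).2.2
        = (PySem.List.pyRange (K:Int) (n0:Int)).foldl (pvStepB row (K:Int))
          (max acc ((row.take K).prod)) := by
      by_cases hn : K ≤ n0
      · have := pv_inner row K n0 hK h2 h3 (n0 - K) K rfl le_rfl hn (max acc ((row.take K).prod))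
        simpa using this
      · rw [PySem.List.pyRange_one_eq_nil (a := (K:Int)) (b := (n0:Int)) (by exact_mod_cast (by omega : n0 ≤ K))]
        rfl
    rw [hnums, hmulA, hmulB, hhead]
    exact ih _ hrest

theorem find_horizontal_max_spec : Claim_equal_find_horizontal_max := by
  intro g k _ hpre
  obtain ⟨hp1, hp2, hp3⟩ := hpre
  unfold Spec_find_horizontal_max find_horizontal_max find_horizontal_max_alt
  cases g with
  | nil => rfl
  | cons r t =>
    have hk1 : 1 ≤ k := hp1.resolve_left (by simp)
    have hkK : k = (k.toNat : Int) := by omega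
    rw [hkK]
    simp only [List.headD_cons]
    exact pv_fold k.toNat (by omega) r.length (r :: t) 0 (fun row hrow => by
      obtain ⟨ha, hb⟩ := hp2 row hrow
      refine ⟨ha, by simpa using hb, fun hK1 => ?_⟩
      have := hp3 (by omega) row hrow
      simpa using this)
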